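-- pv_equiv track=rewrite | github.com/sidistic/RL-and-SPR | Bayes Experiment/preprocessing/preprocess_20News/preprocess.py | updateCounter
-- ===== SOURCE A (Python) =====
-- def updateCounter(dictOfWords, listOfWords):
--     for x in listOfWords:
--         if x in dictOfWords:
--             counter = dictOfWords.get(x, '')
--             # print (x, counter,)
--             counter += 1
--             # print (counter)
--             d1 = {x: counter}
--             dictOfWords.update(d1)
--     return dictOfWords
-- ===== SOURCE B (Python) =====
-- def updateCounter(dictOfWords, listOfWords):
--     # Count-then-merge: build a frequency table of listOfWords, then one pass
--     # over the dict's keys adding the aggregated counts in place.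
--     counts = {}
--     for w in listOfWords:
--         counts[w] = counts.get(w, 0) + 1
--     for word in dictOfWords:
--         dictOfWords[word] += counts.get(word, 0)
--     return dictOfWords
-- ===== Notes on version B (the rewrite author's own statement) =====
-- stated objective: alternative
-- what changed: A increments the dict entry once per occurrence while scanning listOfWords element by element; B first builds a frequency table of listOfWords in one pass and then makes a single pass over the dict's keys, adding each aggregated count in place.
import Mathlib
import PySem

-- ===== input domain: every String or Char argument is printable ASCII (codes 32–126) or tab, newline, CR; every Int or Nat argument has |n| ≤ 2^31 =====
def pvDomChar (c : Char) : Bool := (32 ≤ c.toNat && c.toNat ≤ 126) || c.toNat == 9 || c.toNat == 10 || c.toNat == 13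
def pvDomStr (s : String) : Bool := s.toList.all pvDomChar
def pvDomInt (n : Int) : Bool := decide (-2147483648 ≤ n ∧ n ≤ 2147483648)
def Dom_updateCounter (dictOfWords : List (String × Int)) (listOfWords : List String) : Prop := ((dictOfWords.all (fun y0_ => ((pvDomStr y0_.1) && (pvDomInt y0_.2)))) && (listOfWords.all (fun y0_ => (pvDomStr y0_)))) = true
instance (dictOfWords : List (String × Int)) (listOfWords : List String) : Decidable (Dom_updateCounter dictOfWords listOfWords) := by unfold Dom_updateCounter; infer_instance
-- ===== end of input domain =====

-- B replaces A's per-occurrence increment loop by a count-then-merge two-pass structure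
-- (objective: alternative decomposition; both mutate the dict in place and return it,
-- the equivalence proved here is about the returned value).

-- ===== PORT A =====
-- A: for x in listOfWords: if x in d: counter = d.get(x,'') ; counter += 1 ; d.update({x: counter})
-- (the '' default of .get is unreachable — x is in d on that branch — and is ported as 0)
def updateCounter (dictOfWords : List (String × Int)) (listOfWords : List String) : List (String × Int) :=
  (listOfWords.foldl
    (fun d x =>
      if d.contains x then
        let counter := d.getD x 0 + 1
        d.update [(x, counter)]
      else d)
    (PySem.Dict.ofList dictOfWords)).items

-- ===== PORT B =====
-- B: counts = {} ; for w in listOfWords: counts[w] = counts.get(w,0)+1 ;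
--    for word in dictOfWords: dictOfWords[word] += counts.get(word, 0) ; return dictOfWords
def updateCounter_alt (dictOfWords : List (String × Int)) (listOfWords : List String) : List (String × Int) :=
  let counts := listOfWords.foldl (fun c w => c.insert w (c.getD w 0 + 1)) PySem.Dict.empty
  let d := PySem.Dict.ofList dictOfWords
  (d.keys.foldl (fun acc word => acc.insert word (acc.getD word 0 + counts.getD word 0)) d).items

-- ===== PRECONDITION & SPEC =====
def Spec_updateCounter (dictOfWords : List (String × Int)) (listOfWords : List String) (out : List (String × Int)) : Prop := out = updateCounter_alt dictOfWords listOfWords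
instance (dictOfWords : List (String × Int)) (listOfWords : List String) (out : List (String × Int)) : Decidable (Spec_updateCounter dictOfWords listOfWords out) := by unfold Spec_updateCounter; infer_instance

-- ===== CLAIM (what is proved, stated in full; the proofs are below) =====
def Claim_equal_updateCounter : Prop := ∀ (dictOfWords : List (String × Int)) (listOfWords : List String), Dom_updateCounter dictOfWords listOfWords → Spec_updateCounter dictOfWords listOfWords (updateCounter dictOfWords listOfWords)

-- ===== LEMMAS AND PROOFS =====

-- A's loop: each key of d ends at its old value plus the number of its occurrences in ws.
lemma foldA_items (ws : List String) (d : PySem.Dict String Int) (h : d.keys.Nodup) :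
    (ws.foldl
      (fun d x =>
        if d.contains x then
          let counter := d.getD x 0 + 1
          d.update [(x, counter)]
        else d) d).items
      = d.items.map (fun p => (p.1, p.2 + (ws.count p.1 : Int))) := by
  induction ws generalizing d with
  | nil => simp
  | cons x ws ih =>
    simp only [List.foldl_cons]
    by_cases hc : d.contains x = true
    · rw [hc]
      simp only [if_true]
      have hupd : d.update [(x, d.getD x 0 + 1)] = d.insert x (d.getD x 0 + 1) := rfl
      rw [hupd]
      have hkeys := PySem.Dict.keys_insert_of_contains d (d.getD x 0 + 1) hc
      rw [ih _ (by rw [hkeys]; exact h)]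
      rw [PySem.Dict.items_insert_of_contains d _ hc, List.map_map]
      apply List.map_congr_left
      intro p hp
      by_cases hx : p.1 = x
      · have : (x, p.2) ∈ d.items := by subst hx; simpa using hp
        have hv : d.getD x 0 = p.2 := PySem.Dict.getD_of_mem_items d this h 0
        simp only [Function.comp_apply, hx, beq_self_eq_true, if_true, hv, List.count_cons,
          beq_self_eq_true]
        subst hx
        simp only [Prod.mk.injEq, true_and]
        push_cast
        ring
      · have hx' : x ≠ p.1 := Ne.symm hx
        have hbe : (p.1 == x) = false := by simp [hx]
        simp only [Function.comp_apply, hbe, Bool.false_eq_true, if_false, List.count_cons]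
        simp [hx']
    · simp only [Bool.not_eq_true] at hc
      rw [hc]
      simp only [Bool.false_eq_true, if_false]
      rw [ih d h]
      apply List.map_congr_left
      intro p hp
      have hmem := PySem.Dict.mem_keys_of_mem_items d hp
      have hx : p.1 ≠ x := by
        intro h'
        exact absurd ((PySem.Dict.contains_iff_mem_keys d x).2 (h' ▸ hmem)) (by simp [hc])
      have hx' : x ≠ p.1 := Ne.symm hx
      simp [hx']

-- B's merge loop over a duplicate-free list of keys all present in acc:
-- exactly the listed keys get the corresponding count added, positions unchanged.
lemma foldB_items (c : PySem.Dict String Int) (ks : List String) (acc : PySem.Dict String Int)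
    (h : acc.keys.Nodup) (hks : ks.Nodup) (hin : ∀ k ∈ ks, acc.contains k = true) :
    (ks.foldl (fun acc k => acc.insert k (acc.getD k 0 + c.getD k 0)) acc).items
      = acc.items.map (fun p => if p.1 ∈ ks then (p.1, p.2 + c.getD p.1 0) else p) := by
  induction ks generalizing acc with
  | nil => simp
  | cons k ks ih =>
    simp only [List.foldl_cons]
    have hck : acc.contains k = true := hin k (by simp)
    have hkeys := PySem.Dict.keys_insert_of_contains acc (acc.getD k 0 + c.getD k 0) hck
    rw [ih _ (by rw [hkeys]; exact h) hks.of_cons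
      (by intro a ha
          rw [PySem.Dict.contains_iff_mem_keys, hkeys, ← PySem.Dict.contains_iff_mem_keys]
          exact hin a (List.mem_cons_of_mem _ ha))]
    rw [PySem.Dict.items_insert_of_contains acc _ hck, List.map_map]
    apply List.map_congr_left
    intro p hp
    by_cases hx : p.1 = k
    · have : (k, p.2) ∈ acc.items := by subst hx; simpa using hp
      have hv : acc.getD k 0 = p.2 := PySem.Dict.getD_of_mem_items acc this h 0
      have hknot : k ∉ ks := (List.nodup_cons.1 hks).1
      simp [Function.comp_apply, hx, hknot, hv, List.mem_cons]
    · have hne : (p.1 == k) = false := by simp [hx]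
      simp only [Function.comp_apply, hne, Bool.false_eq_true, if_false, List.mem_cons]
      by_cases hm : p.1 ∈ ks <;> simp [hm, hx]

-- ===== VERDICT (by name: the statement is the Claim_ definition above) =====
theorem updateCounter_spec : Claim_equal_updateCounter := by
  intro dictOfWords listOfWords _
  unfold Spec_updateCounter updateCounter updateCounter_alt
  have hnd := PySem.Dict.nodup_keys_ofList (κ := String) (ν := Int) dictOfWords
  rw [foldA_items listOfWords _ hnd]
  rw [PySem.Dict.foldl_insert_getD_add_one_eq_counter]
  rw [foldB_items _ _ _ hnd hnd (by intro k hk; exact (PySem.Dict.contains_iff_mem_keys _ k).2 hk)]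
  apply List.map_congr_left
  intro p hp
  have hmem := PySem.Dict.mem_keys_of_mem_items _ hp
  simp [hmem, PySem.Dict.getD_counter]
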